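-- pv_equiv track=rewrite | github.com/GanizaniSitara/tools-static-analysis | 4_gen_docs.py | compute_hotspot_explanation
-- ===== SOURCE A (Python) =====
-- def compute_hotspot_explanation(m: dict, flags: list[dict]) -> str:
--     """Return a one-line human-readable summary of score drivers and smells."""
--     parts = []
--     red_flags = [f for f in flags if f["level"] == "red"]
--     yellow_flags = [f for f in flags if f["level"] == "yellow"]
--     green_flags = [f for f in flags if f["level"] == "green"]
--
--     if red_flags:
--         parts.append("Risk: " + "; ".join(f["label"] for f in red_flags))
--     if yellow_flags:
--         parts.append("Watch: " + "; ".join(f["label"] for f in yellow_flags))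
--     if green_flags:
--         parts.append("OK: " + "; ".join(f["label"] for f in green_flags))
--
--     drivers = []
--     if m.get("fan_out", 0) >= 3:
--         drivers.append(f"fan-out={m['fan_out']}")
--     if m.get("fan_in", 0) >= 3:
--         drivers.append(f"fan-in={m['fan_in']}")
--     if m.get("cross_repo_refs", 0) > 0:
--         drivers.append(f"cross-repo={m['cross_repo_refs']}")
--     if drivers:
--         parts.append("Drivers: " + ", ".join(drivers))
--
--     return " | ".join(parts) if parts else "Low coupling"
-- ===== SOURCE B (Python) =====
-- def compute_hotspot_explanation(m: dict, flags: list[dict]) -> str: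
--     """Return a one-line human-readable summary of score drivers and smells."""
--     rank = {"red": 0, "yellow": 1, "green": 2}
--     prefixes = ["Risk: ", "Watch: ", "OK: "]
--     # stable sort groups the flags by severity while keeping per-level order
--     ordered = sorted(flags, key=lambda f: rank.get(f["level"], 3))
--     parts = []
--     cur = None
--     for f in ordered:
--         r = rank.get(f["level"], 3)
--         if r == 3:
--             break  # unknown levels sort last; none of them is reported
--         if cur != r:
--             parts.append(prefixes[r] + f["label"])
--             cur = r
--         else:
--             parts[-1] += "; " + f["label"]
--
--     drivers = []
--     if m.get("fan_out", 0) >= 3: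
--         drivers.append(f"fan-out={m['fan_out']}")
--     if m.get("fan_in", 0) >= 3:
--         drivers.append(f"fan-in={m['fan_in']}")
--     if m.get("cross_repo_refs", 0) > 0:
--         drivers.append(f"cross-repo={m['cross_repo_refs']}")
--     if drivers:
--         parts.append("Drivers: " + ", ".join(drivers))
--
--     return " | ".join(parts) if parts else "Low coupling"
-- ===== Notes on version B (the rewrite author's own statement) =====
-- stated objective: alternative
-- what changed: Replaces A's three filter passes and per-group joins by a stable sort of flags on a severity rank followed by a single group-scan that appends each label to the current part or opens a new one; drivers block unchanged.
import Mathlib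
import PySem

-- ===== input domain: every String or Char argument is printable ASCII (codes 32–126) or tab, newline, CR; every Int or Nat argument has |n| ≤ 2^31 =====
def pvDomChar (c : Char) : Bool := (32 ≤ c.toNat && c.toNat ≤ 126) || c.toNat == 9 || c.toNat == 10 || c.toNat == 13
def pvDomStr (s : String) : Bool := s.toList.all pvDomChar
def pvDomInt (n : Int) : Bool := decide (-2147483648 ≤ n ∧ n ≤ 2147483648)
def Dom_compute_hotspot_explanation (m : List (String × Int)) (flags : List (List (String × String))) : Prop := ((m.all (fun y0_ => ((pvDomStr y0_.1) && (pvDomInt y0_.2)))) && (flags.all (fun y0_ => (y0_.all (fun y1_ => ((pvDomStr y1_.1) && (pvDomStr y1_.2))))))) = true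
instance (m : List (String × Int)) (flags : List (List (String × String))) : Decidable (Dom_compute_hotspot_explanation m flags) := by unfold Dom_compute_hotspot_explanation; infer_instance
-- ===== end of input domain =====

-- B replaces A's three filter passes over flags by a stable sort on a severity rank followed by
-- a single group-scan that builds each "Risk:/Watch:/OK:" part incrementally (alternative algorithm).

-- shared dict-access helpers: f["label"]-style lookup (first match; Pre_ guarantees presence)
-- and m.get(k, 0)
def pvGetS (f : List (String × String)) (k : String) : String := (List.lookup k f).getD ""
def pvGetI (m : List (String × Int)) (k : String) : Int := (List.lookup k m).getD 0

-- ===== PORT A =====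
def compute_hotspot_explanation (m : List (String × Int)) (flags : List (List (String × String))) : String :=
  let red_flags := flags.filter (fun f => pvGetS f "level" == "red")
  let yellow_flags := flags.filter (fun f => pvGetS f "level" == "yellow")
  let green_flags := flags.filter (fun f => pvGetS f "level" == "green")
  let parts : List String := []
  let parts := if red_flags.isEmpty then parts else
    parts ++ ["Risk: " ++ PySem.Str.join "; " (red_flags.map (fun f => pvGetS f "label"))]
  let parts := if yellow_flags.isEmpty then parts else
    parts ++ ["Watch: " ++ PySem.Str.join "; " (yellow_flags.map (fun f => pvGetS f "label"))]
  let parts := if green_flags.isEmpty then parts else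
    parts ++ ["OK: " ++ PySem.Str.join "; " (green_flags.map (fun f => pvGetS f "label"))]
  let drivers : List String := []
  let drivers := if 3 ≤ pvGetI m "fan_out" then drivers ++ ["fan-out=" ++ PySem.Int.toStr (pvGetI m "fan_out")] else drivers
  let drivers := if 3 ≤ pvGetI m "fan_in" then drivers ++ ["fan-in=" ++ PySem.Int.toStr (pvGetI m "fan_in")] else drivers
  let drivers := if 0 < pvGetI m "cross_repo_refs" then drivers ++ ["cross-repo=" ++ PySem.Int.toStr (pvGetI m "cross_repo_refs")] else drivers
  let parts := if drivers.isEmpty then parts else parts ++ ["Drivers: " ++ PySem.Str.join ", " drivers]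
  if parts.isEmpty then "Low coupling" else PySem.Str.join " | " parts

-- ===== PORT B =====
-- Source B's rank dict {"red":0,"yellow":1,"green":2} and rank.get(f["level"], 3)
def pvRankD : PySem.Dict String Int := PySem.Dict.ofList [("red", 0), ("yellow", 1), ("green", 2)]
def pvRank (f : List (String × String)) : Int := PySem.Dict.getD pvRankD (pvGetS f "level") 3

-- Source B's for-loop over the sorted list with its `break`, ported as structural recursion on the
-- remaining flags; state = (parts, cur).  parts[-1] += s is exact here: the else-branch only
-- runs with cur = some r, so parts is non-empty (getLast?.getD "" is its last element).
def pvScan (parts : List String) (cur : Option Int) : List (List (String × String)) → List String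
  | [] => parts
  | f :: fs =>
    let r := pvRank f
    if r == 3 then parts
    else if cur ≠ some r then
      pvScan (parts ++ [(PySem.List.pyGet? ["Risk: ", "Watch: ", "OK: "] r).getD "" ++ pvGetS f "label"]) (some r) fs
    else
      pvScan (parts.dropLast ++ [(parts.getLast?).getD "" ++ ("; " ++ pvGetS f "label")]) cur fs

def compute_hotspot_explanation_alt (m : List (String × Int)) (flags : List (List (String × String))) : String :=
  let ordered := PySem.List.sorted flags pvRank false
  let parts := pvScan [] none ordered
  let drivers : List String := []
  let drivers := if 3 ≤ pvGetI m "fan_out" then drivers ++ ["fan-out=" ++ PySem.Int.toStr (pvGetI m "fan_out")] else drivers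
  let drivers := if 3 ≤ pvGetI m "fan_in" then drivers ++ ["fan-in=" ++ PySem.Int.toStr (pvGetI m "fan_in")] else drivers
  let drivers := if 0 < pvGetI m "cross_repo_refs" then drivers ++ ["cross-repo=" ++ PySem.Int.toStr (pvGetI m "cross_repo_refs")] else drivers
  let parts := if drivers.isEmpty then parts else parts ++ ["Drivers: " ++ PySem.Str.join ", " drivers]
  if parts.isEmpty then "Low coupling" else PySem.Str.join " | " parts

-- ===== PRECONDITION & SPEC =====
-- Pre_ excludes exactly the inputs where the Python A raises KeyError: a flag without a
-- "level" key, or a red/yellow/green flag without a "label" key.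
def Pre_compute_hotspot_explanation (m : List (String × Int)) (flags : List (List (String × String))) : Prop :=
  ∀ f ∈ flags, (List.lookup "level" f).isSome = true ∧
    ((List.lookup "level" f).getD "" ∈ (["red", "yellow", "green"] : List String) →
      (List.lookup "label" f).isSome = true)
instance (m : List (String × Int)) (flags : List (List (String × String))) : Decidable (Pre_compute_hotspot_explanation m flags) := by unfold Pre_compute_hotspot_explanation; infer_instance

def pvWitness_compute_hotspot_explanation : (List (String × Int)) × (List (List (String × String))) :=
  ([("fan_out", 4)], [[("level", "red"), ("label", "big")]])

def Spec_compute_hotspot_explanation (m : List (String × Int)) (flags : List (List (String × String))) (out : String) : Prop := out = compute_hotspot_explanation_alt m flags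
instance (m : List (String × Int)) (flags : List (List (String × String))) (out : String) : Decidable (Spec_compute_hotspot_explanation m flags out) := by unfold Spec_compute_hotspot_explanation; infer_instance

-- ===== CLAIM (what is proved, stated in full; the proofs are below) =====
def Claim_equal_compute_hotspot_explanation : Prop := ∀ (m : List (String × Int)) (flags : List (List (String × String))), Dom_compute_hotspot_explanation m flags → Pre_compute_hotspot_explanation m flags → Spec_compute_hotspot_explanation m flags (compute_hotspot_explanation m flags)

-- ===== LEMMAS AND PROOFS =====

-- the rank key, spelt out
lemma pvRank_spec (f : List (String × String)) : pvRank f =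
    (if pvGetS f "level" == "red" then 0 else if pvGetS f "level" == "yellow" then 1
     else if pvGetS f "level" == "green" then 2 else 3) := by
  have h : pvRankD = PySem.Dict.mk [("red", 0), ("yellow", 1), ("green", 2)] := by decide
  rw [pvRank, h]
  generalize pvGetS f "level" = s
  simp only [PySem.Dict.getD, PySem.Dict.get?_mk_cons]
  by_cases h1 : s == "red" <;> by_cases h2 : s == "yellow" <;> by_cases h3 : s == "green" <;>
    simp_all [PySem.Dict.get?, List.find?, BEq.comm]

lemma pvRank_values (f : List (String × String)) :
    pvRank f = 0 ∨ pvRank f = 1 ∨ pvRank f = 2 ∨ pvRank f = 3 := by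
  rw [pvRank_spec]; split_ifs <;> simp

def pvFilt (flags : List (List (String × String))) (i : Int) : List (List (String × String)) :=
  flags.filter (fun f => pvRank f == i)

lemma pvFilt_level (flags : List (List (String × String))) :
    flags.filter (fun f => pvGetS f "level" == "red") = pvFilt flags 0 ∧
    flags.filter (fun f => pvGetS f "level" == "yellow") = pvFilt flags 1 ∧
    flags.filter (fun f => pvGetS f "level" == "green") = pvFilt flags 2 := by
  refine ⟨List.filter_congr ?_, List.filter_congr ?_, List.filter_congr ?_⟩ <;>
    intro f _ <;> rw [pvRank_spec f] <;> split_ifs <;> simp_all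

-- insertion into a rank-split list
lemma pvInsertBy_split (key : List (String × String) → Int) (x : List (String × String))
    (u v : List (List (String × String)))
    (hu : ∀ y ∈ u, ¬ key x < key y) (hv : ∀ y ∈ v, key x < key y) :
    PySem.List.insertBy (fun a b => decide (key a < key b)) x (u ++ v) = u ++ x :: v := by
  induction u with
  | nil =>
    cases v with
    | nil => rfl
    | cons y ys =>
      have := hv y (by simp)
      simp [PySem.List.insertBy, this]
  | cons a u' ih =>
    have ha := hu a (by simp)
    simp only [List.cons_append, PySem.List.insertBy, decide_eq_true_eq, ha, if_false]
    rw [ih (fun y hy => hu y (by simp [hy]))]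

lemma pvFoldl_ins_blocks (fs : List (List (String × String)))
    (l0 l1 l2 l3 : List (List (String × String)))
    (h0 : ∀ y ∈ l0, pvRank y = 0) (h1 : ∀ y ∈ l1, pvRank y = 1)
    (h2 : ∀ y ∈ l2, pvRank y = 2) (h3 : ∀ y ∈ l3, pvRank y = 3) :
    fs.foldl (fun acc x => PySem.List.insertBy (fun a b => decide (pvRank a < pvRank b)) x acc)
      (l0 ++ l1 ++ l2 ++ l3) =
    (l0 ++ pvFilt fs 0) ++ (l1 ++ pvFilt fs 1) ++ (l2 ++ pvFilt fs 2) ++ (l3 ++ pvFilt fs 3) := by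
  induction fs generalizing l0 l1 l2 l3 with
  | nil => simp [pvFilt]
  | cons x fs ih =>
    simp only [List.foldl_cons, pvFilt, List.filter_cons]
    rcases pvRank_values x with hr | hr | hr | hr
    · have hins : PySem.List.insertBy (fun a b => decide (pvRank a < pvRank b)) x
          (l0 ++ l1 ++ l2 ++ l3) = l0 ++ x :: (l1 ++ l2 ++ l3) := by
        have := pvInsertBy_split pvRank x l0 (l1 ++ l2 ++ l3)
          (fun y hy => by rw [h0 y hy, hr]; omega)
          (fun y hy => by
            rcases (by simpa using hy) with h | h | h
            · rw [h1 y h, hr]; omega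
            · rw [h2 y h, hr]; omega
            · rw [h3 y h, hr]; omega)
        simpa [List.append_assoc] using this
      rw [hins, show l0 ++ x :: (l1 ++ l2 ++ l3) = (l0 ++ [x]) ++ l1 ++ l2 ++ l3 by simp,
        ih (l0 ++ [x]) l1 l2 l3 (by intro y hy; rcases (by simpa using hy) with h | h; exact h0 y h; rw [h, hr]) h1 h2 h3]
      simp [pvFilt, hr]
    · have hins : PySem.List.insertBy (fun a b => decide (pvRank a < pvRank b)) x
          (l0 ++ l1 ++ l2 ++ l3) = (l0 ++ l1) ++ x :: (l2 ++ l3) := by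
        have := pvInsertBy_split pvRank x (l0 ++ l1) (l2 ++ l3)
          (fun y hy => by
            rcases (by simpa using hy) with h | h
            · rw [h0 y h, hr]; omega
            · rw [h1 y h, hr]; omega)
          (fun y hy => by
            rcases (by simpa using hy) with h | h
            · rw [h2 y h, hr]; omega
            · rw [h3 y h, hr]; omega)
        simpa [List.append_assoc] using this
      rw [hins, show (l0 ++ l1) ++ x :: (l2 ++ l3) = l0 ++ (l1 ++ [x]) ++ l2 ++ l3 by simp,
        ih l0 (l1 ++ [x]) l2 l3 h0 (by intro y hy; rcases (by simpa using hy) with h | h; exact h1 y h; rw [h, hr]) h2 h3]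
      simp [pvFilt, hr]
    · have hins : PySem.List.insertBy (fun a b => decide (pvRank a < pvRank b)) x
          (l0 ++ l1 ++ l2 ++ l3) = (l0 ++ l1 ++ l2) ++ x :: l3 := by
        have := pvInsertBy_split pvRank x (l0 ++ l1 ++ l2) l3
          (fun y hy => by
            rcases (by simpa using hy) with h | h | h
            · rw [h0 y h, hr]; omega
            · rw [h1 y h, hr]; omega
            · rw [h2 y h, hr]; omega)
          (fun y hy => by rw [h3 y hy, hr]; omega)
        simpa [List.append_assoc] using this
      rw [hins, show (l0 ++ l1 ++ l2) ++ x :: l3 = l0 ++ l1 ++ (l2 ++ [x]) ++ l3 by simp,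
        ih l0 l1 (l2 ++ [x]) l3 h0 h1 (by intro y hy; rcases (by simpa using hy) with h | h; exact h2 y h; rw [h, hr]) h3]
      simp [pvFilt, hr]
    · have hins : PySem.List.insertBy (fun a b => decide (pvRank a < pvRank b)) x
          (l0 ++ l1 ++ l2 ++ l3) = (l0 ++ l1 ++ l2 ++ l3) ++ x :: [] := by
        have := pvInsertBy_split pvRank x (l0 ++ l1 ++ l2 ++ l3) []
          (fun y hy => by
            rcases (by simpa using hy) with h | h | h | h
            · rw [h0 y h, hr]; omega
            · rw [h1 y h, hr]; omega
            · rw [h2 y h, hr]; omega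
            · rw [h3 y h, hr]; omega)
          (by simp)
        simpa using this
      rw [hins, show (l0 ++ l1 ++ l2 ++ l3) ++ x :: [] = l0 ++ l1 ++ l2 ++ (l3 ++ [x]) by simp,
        ih l0 l1 l2 (l3 ++ [x]) h0 h1 h2 (by intro y hy; rcases (by simpa using hy) with h | h; exact h3 y h; rw [h, hr])]
      simp [pvFilt, hr]

-- the stable sort groups the flags into the four rank blocks, per-block order preserved
lemma pvSorted_blocks (flags : List (List (String × String))) :
    PySem.List.sorted flags pvRank false =
      pvFilt flags 0 ++ pvFilt flags 1 ++ pvFilt flags 2 ++ pvFilt flags 3 := by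
  rw [PySem.List.sorted_eq_foldl_insertBy]
  simpa using pvFoldl_ins_blocks flags [] [] [] [] (by simp) (by simp) (by simp) (by simp)

-- string bookkeeping for the incremental "; "-joins
lemma pvFoldl_str_pull (gs : List (List (String × String))) (g : List (String × String) → String)
    (p x : String) :
    gs.foldl (fun a f => a ++ ("; " ++ g f)) (p ++ x) = p ++ gs.foldl (fun a f => a ++ ("; " ++ g f)) x := by
  induction gs generalizing x with
  | nil => rfl
  | cons b bs ih => simp only [List.foldl_cons, String.append_assoc, ih]

lemma pvJoin_cons_str (l0 b : String) (bs : List String) :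
    PySem.Str.join "; " (l0 :: b :: bs) = l0 ++ ("; " ++ PySem.Str.join "; " (b :: bs)) := by
  apply String.toList_injective
  simp [PySem.Str.join, PySem.Chars.join_cons_cons]

lemma pvJoin_foldl (l0 : String) (ls : List (List (String × String)))
    (g : List (String × String) → String) :
    PySem.Str.join "; " (l0 :: ls.map g) = ls.foldl (fun a f => a ++ ("; " ++ g f)) l0 := by
  induction ls generalizing l0 with
  | nil => apply String.toList_injective; simp [PySem.Str.join, PySem.Chars.join_singleton]
  | cons b bs ih =>
    rw [List.map_cons, pvJoin_cons_str, ih (g b), List.foldl_cons,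
      pvFoldl_str_pull bs g l0 ("; " ++ g b), pvFoldl_str_pull bs g "; " (g b)]

-- the scan over one rank block
lemma pvScan_same (gs : List (List (String × String))) (r : Int)
    (hr : ∀ g ∈ gs, pvRank g = r) (h3 : r ≠ 3)
    (rest : List (List (String × String))) (ps : List String) (p : String) :
    pvScan (ps ++ [p]) (some r) (gs ++ rest) =
      pvScan (ps ++ [gs.foldl (fun a f => a ++ ("; " ++ pvGetS f "label")) p]) (some r) rest := by
  induction gs generalizing p with
  | nil => simp
  | cons g gs ih =>
    have hg : pvRank g = r := hr g (by simp)
    have hne : (r == (3 : Int)) = false := by simpa using h3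
    simp only [List.cons_append, pvScan, hg, hne, Bool.false_eq_true, if_false, ne_eq,
      not_true_eq_false, List.dropLast_concat, List.getLast?_append_cons, List.getLast?_singleton,
      Option.getD_some]
    rw [ih (fun y hy => hr y (by simp [hy])) (p ++ ("; " ++ pvGetS g "label")), List.foldl_cons]

lemma pvScan_block (gs : List (List (String × String))) (r : Int)
    (hr : ∀ g ∈ gs, pvRank g = r) (h3 : r ≠ 3) (cur : Option Int) (hc : cur ≠ some r)
    (rest : List (List (String × String))) (parts : List String) :
    pvScan parts cur (gs ++ rest) =
      pvScan (parts ++ (if gs.isEmpty then [] else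
          [(PySem.List.pyGet? ["Risk: ", "Watch: ", "OK: "] r).getD "" ++
            PySem.Str.join "; " (gs.map (fun f => pvGetS f "label"))]))
        (if gs.isEmpty then cur else some r) rest := by
  cases gs with
  | nil => simp
  | cons g gs =>
    have hg : pvRank g = r := hr g (by simp)
    have hne : (r == (3 : Int)) = false := by simpa using h3
    simp only [List.cons_append, pvScan, hg, hne, Bool.false_eq_true, if_false, hc, ne_eq,
      not_false_iff, if_pos, List.isEmpty_cons]
    rw [pvScan_same gs r (fun y hy => hr y (by simp [hy])) h3 rest parts _, List.map_cons,
      pvJoin_foldl (pvGetS g "label") gs (fun f => pvGetS f "label"),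
      pvFoldl_str_pull gs (fun f => pvGetS f "label")
        ((PySem.List.pyGet? ["Risk: ", "Watch: ", "OK: "] r).getD "") (pvGetS g "label")]

lemma pvScan_tail (gs : List (List (String × String))) (hr : ∀ g ∈ gs, pvRank g = 3)
    (parts : List String) (cur : Option Int) : pvScan parts cur gs = parts := by
  cases gs with
  | nil => rfl
  | cons g gs =>
    have hg : pvRank g = 3 := hr g (by simp)
    simp [pvScan, hg]

lemma pvFilt_rank (flags : List (List (String × String))) (i : Int) :
    ∀ g ∈ pvFilt flags i, pvRank g = i := by
  intro g hg
  simpa using List.of_mem_filter hg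

-- the scan over the sorted list builds exactly A's parts list
lemma pvParts_eq (flags : List (List (String × String))) :
    pvScan [] none (PySem.List.sorted flags pvRank false) =
      (let p1 := if (pvFilt flags 0).isEmpty then ([] : List String) else
        [] ++ ["Risk: " ++ PySem.Str.join "; " ((pvFilt flags 0).map (fun f => pvGetS f "label"))]
       let p2 := if (pvFilt flags 1).isEmpty then p1 else
        p1 ++ ["Watch: " ++ PySem.Str.join "; " ((pvFilt flags 1).map (fun f => pvGetS f "label"))]
       if (pvFilt flags 2).isEmpty then p2 else
        p2 ++ ["OK: " ++ PySem.Str.join "; " ((pvFilt flags 2).map (fun f => pvGetS f "label"))]) := by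
  rw [pvSorted_blocks, List.append_assoc, List.append_assoc,
    pvScan_block (pvFilt flags 0) 0 (pvFilt_rank flags 0) (by decide) none (by simp),
    pvScan_block (pvFilt flags 1) 1 (pvFilt_rank flags 1) (by decide) _ (by split <;> simp),
    pvScan_block (pvFilt flags 2) 2 (pvFilt_rank flags 2) (by decide) _ (by split <;> (try split) <;> simp),
    pvScan_tail (pvFilt flags 3) (pvFilt_rank flags 3)]
  have e0 : ((PySem.List.pyGet? ["Risk: ", "Watch: ", "OK: "] (0 : Int)).getD "") = "Risk: " := by decide
  have e1 : ((PySem.List.pyGet? ["Risk: ", "Watch: ", "OK: "] (1 : Int)).getD "") = "Watch: " := by decide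
  have e2 : ((PySem.List.pyGet? ["Risk: ", "Watch: ", "OK: "] (2 : Int)).getD "") = "OK: " := by decide
  rw [e0, e1, e2]
  by_cases h0 : (pvFilt flags 0).isEmpty <;> by_cases h1 : (pvFilt flags 1).isEmpty <;>
    by_cases h2 : (pvFilt flags 2).isEmpty <;> simp [h0, h1, h2]

-- ===== VERDICT (by name: the statement is the Claim_ definition above) =====
theorem compute_hotspot_explanation_spec : Claim_equal_compute_hotspot_explanation := by
  intro m flags _ _
  simp only [Spec_compute_hotspot_explanation, compute_hotspot_explanation,
    compute_hotspot_explanation_alt]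
  rw [pvParts_eq flags, (pvFilt_level flags).1, (pvFilt_level flags).2.1, (pvFilt_level flags).2.2]
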